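-- pv_equiv track=rewrite | github.com/LucasWarner/ISC4U_CULM | Main/MatchOrgAndSep.py | calculateSeparationScore
-- ===== SOURCE A (Python) =====
-- def calculateSeparationScore(matches_left, matches_right):
--     score = 0
--     team_match_indices = []
--     for a in range(max(matches_right+matches_left)):
--         team_indices_left = [i for i, x in enumerate(matches_left) if x == a+1]
--         team_indices_right = [i for i, x in enumerate(matches_right) if x == a+1]
--         team_match_indices.append(team_indices_left+team_indices_right)
--         team_match_indices[-1].sort()
--
--     for t in range(len(team_match_indices)):
--         av_score = 0
--         for m in range(len(team_match_indices[t])-1):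
--             av_score += (team_match_indices[t][m+1]-team_match_indices[t][m])
--         score += av_score**2
--
--     return score
-- ===== SOURCE B (Python) =====
-- def calculateSeparationScore(matches_left, matches_right):
--     # Value-driven: visit each distinct team value >= 1 once (first-occurrence
--     # order); its score is (max index - min index)**2 over both lists' indices.
--     total = 0
--     for v in dict.fromkeys(x for x in matches_left + matches_right if x >= 1):
--         idxs = [i for i, x in enumerate(matches_left) if x == v] \
--              + [i for i, x in enumerate(matches_right) if x == v]
--         total += (max(idxs) - min(idxs)) ** 2
--     return total
-- ===== Notes on version B (the rewrite author's own statement) =====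
-- stated objective: faster
-- what changed: A scans every team number from 1 up to max(all values), rebuilding, concatenating and sorting its index lists and summing adjacent index gaps in an inner loop; B visits each distinct occurring value >= 1 exactly once and scores it directly as (max index - min index)**2, with no sort and no telescoping loop.
-- outside the precondition, e.g. on calculateSeparationScore([], []): A raises ValueError, B returns 0
import Mathlib
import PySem

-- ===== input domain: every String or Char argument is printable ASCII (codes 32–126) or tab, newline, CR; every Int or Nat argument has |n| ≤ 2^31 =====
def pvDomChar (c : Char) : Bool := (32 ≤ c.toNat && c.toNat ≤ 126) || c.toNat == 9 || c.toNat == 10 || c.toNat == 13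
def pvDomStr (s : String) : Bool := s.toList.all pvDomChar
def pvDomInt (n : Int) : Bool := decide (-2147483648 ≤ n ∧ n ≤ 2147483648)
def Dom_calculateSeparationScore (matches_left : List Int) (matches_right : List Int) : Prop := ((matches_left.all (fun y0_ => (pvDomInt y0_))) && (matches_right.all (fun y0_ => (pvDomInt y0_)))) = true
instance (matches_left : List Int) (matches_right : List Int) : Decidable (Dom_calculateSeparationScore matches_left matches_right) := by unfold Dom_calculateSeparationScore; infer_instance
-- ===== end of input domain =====

-- B replaces A's scan over every team number up to max (with a per-team sort and a
-- telescoping inner loop) by one visit per distinct occurring team value, scoring it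
-- as (max index - min index)^2; equivalence of the return values is proved below.

-- ===== PORT A =====
def calculateSeparationScore (matches_left : List Int) (matches_right : List Int) : Int :=
  match PySem.List.max? (matches_right ++ matches_left) (fun x => x) with
  | none => 0   -- max([]) raises ValueError in Python; excluded by Pre_
  | some mx =>
    let team_match_indices : List (List Int) :=
      (PySem.List.pyRange 0 mx 1).foldl (fun tmi a =>
        let team_indices_left :=
          ((PySem.List.enumerate matches_left 0).filter (fun p => p.2 == a + 1)).map (fun p => p.1)
        let team_indices_right :=
          ((PySem.List.enumerate matches_right 0).filter (fun p => p.2 == a + 1)).map (fun p => p.1)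
        tmi ++ [PySem.List.sorted (team_indices_left ++ team_indices_right) (fun x => x) false]) []
    (PySem.List.pyRange 0 (team_match_indices.length : Int) 1).foldl (fun score t =>
      let row := PySem.List.pyGetD team_match_indices t []
      let av_score := (PySem.List.pyRange 0 ((row.length : Int) - 1) 1).foldl
        (fun av m => av + (PySem.List.pyGetD row (m + 1) 0 - PySem.List.pyGetD row m 0)) 0
      score + av_score ^ 2) 0

-- ===== PORT B =====
def calculateSeparationScore_alt (matches_left : List Int) (matches_right : List Int) : Int :=
  (PySem.List.dedup ((matches_left ++ matches_right).filter (fun x => 1 ≤ x))).foldl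
    (fun total v =>
      let idxs :=
        ((PySem.List.enumerate matches_left 0).filter (fun p => p.2 == v)).map (fun p => p.1) ++
        ((PySem.List.enumerate matches_right 0).filter (fun p => p.2 == v)).map (fun p => p.1)
      -- idxs is nonempty for every visited v (v occurs in one of the lists), so
      -- Python's max/min never raise here; getD 0 is never consulted
      total + ((PySem.List.max? idxs (fun x => x)).getD 0
             - (PySem.List.min? idxs (fun x => x)).getD 0) ^ 2) 0

-- ===== PRECONDITION & SPEC =====
-- A evaluates max(matches_right + matches_left), which raises ValueError when both
-- lists are empty; exactly that input is excluded.
def Pre_calculateSeparationScore (matches_left : List Int) (matches_right : List Int) : Prop :=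
  matches_left ++ matches_right ≠ []
instance (matches_left : List Int) (matches_right : List Int) : Decidable (Pre_calculateSeparationScore matches_left matches_right) := by unfold Pre_calculateSeparationScore; infer_instance
def pvWitness_calculateSeparationScore : List Int × List Int := ([1, 2, 1], [2])

def Spec_calculateSeparationScore (matches_left : List Int) (matches_right : List Int) (out : Int) : Prop := out = calculateSeparationScore_alt matches_left matches_right
instance (matches_left : List Int) (matches_right : List Int) (out : Int) : Decidable (Spec_calculateSeparationScore matches_left matches_right out) := by unfold Spec_calculateSeparationScore; infer_instance

-- ===== CLAIM (what is proved, stated in full; the proofs are below) =====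
def Claim_equal_calculateSeparationScore : Prop := ∀ (matches_left : List Int) (matches_right : List Int), Dom_calculateSeparationScore matches_left matches_right → Pre_calculateSeparationScore matches_left matches_right → Spec_calculateSeparationScore matches_left matches_right (calculateSeparationScore matches_left matches_right)
-- ===== LEMMAS AND PROOFS =====


def pvIdx (xs : List Int) (v : Int) : List Int :=
  ((PySem.List.enumerate xs 0).filter (fun p => p.2 == v)).map (fun p => p.1)

def pvComb (l r : List Int) (v : Int) : List Int := pvIdx l v ++ pvIdx r v

def pvTele (row : List Int) : Int :=
  (PySem.List.pyRange 0 ((row.length : Int) - 1) 1).foldl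
    (fun av m => av + (PySem.List.pyGetD row (m + 1) 0 - PySem.List.pyGetD row m 0)) 0

def pvQ (l r : List Int) (v : Int) : Int :=
  (pvTele (PySem.List.sorted (pvComb l r v) (fun x => x) false)) ^ 2

lemma pvIdx_eq_nil_iff (xs : List Int) (v : Int) : pvIdx xs v = [] ↔ v ∉ xs := by
  simp [pvIdx, List.filter_eq_nil_iff, List.mem_iff_getElem, PySem.List.getElem_enumerate,
    PySem.List.length_enumerate]
  aesop

lemma pvTele_sorted (C : List Int) (hC : C ≠ []) :
    pvTele (PySem.List.sorted C (fun x => x) false)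
      = (PySem.List.max? C (fun x => x)).getD 0 - (PySem.List.min? C (fun x => x)).getD 0 := by
  have hn : 0 < C.length := List.length_pos_iff.mpr hC
  set s := PySem.List.sorted C (fun x => x) false with hs
  have hlen : s.length = C.length := PySem.List.length_sorted C _ false
  obtain ⟨M, hM⟩ : ∃ M, PySem.List.max? C (fun x : Int => x) = some M := by
    cases hm : PySem.List.max? C (fun x : Int => x) with
    | none => exact absurd ((PySem.List.max?_eq_none_iff _ _).mp hm) hC
    | some m => exact ⟨m, rfl⟩
  obtain ⟨m, hm⟩ : ∃ m, PySem.List.min? C (fun x : Int => x) = some m := by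
    cases hm : PySem.List.min? C (fun x : Int => x) with
    | none => exact absurd ((PySem.List.min?_eq_none_iff _ _).mp hm) hC
    | some m => exact ⟨m, rfl⟩
  rw [hM, hm]
  unfold pvTele
  rw [PySem.List.foldl_add]
  have h1 : ((s.length : Int) - 1) = ((s.length - 1 : Nat) : Int) := by omega
  rw [h1, PySem.List.pyRange_zero_natCast, List.map_map]
  have h2 : ∀ k : Nat, k < s.length - 1 →
      ((fun m => PySem.List.pyGetD s (m + 1) 0 - PySem.List.pyGetD s m 0) ∘ fun k : Nat => (k : Int)) k
        = (fun i : Nat => s.getD (i+1) 0 - s.getD i 0) k := by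
    intro k hk
    simp only [Function.comp]
    have : (k : Int) + 1 = ((k + 1 : Nat) : Int) := by push_cast; ring
    rw [this, PySem.List.pyGetD_natCast, PySem.List.pyGetD_natCast]
  rw [List.map_congr_left (by intro k hk; exact h2 k (by simpa using List.mem_range.mp hk))]
  rw [← List.sum_toFinset _ (List.nodup_range), List.toFinset_range]
  rw [Finset.sum_range_sub (fun i => s.getD i 0) (s.length - 1)]
  have hmemmax : s.getD (s.length - 1) 0 = M := by
    have hlt : s.length - 1 < s.length := by omega
    rw [List.getD_eq_getElem s 0 hlt]
    apply le_antisymm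
    · exact PySem.List.max?_isMax hM _ ((PySem.List.mem_sorted C _ false _).mp (List.getElem_mem hlt))
    · obtain ⟨p, hp, hpe⟩ := List.mem_iff_getElem.mp ((PySem.List.mem_sorted C (fun x : Int => x) false M).mpr (PySem.List.max?_mem hM))
      rw [← hs] at hp
      have hmono := PySem.List.sorted_id_getElem_mono C (p := p) (q := s.length - 1) (by omega) (by rw [← hs]; omega)
      exact hpe ▸ hmono
  have hmemmin : s.getD 0 0 = m := by
    rw [List.getD_eq_getElem s 0 (by omega)]
    apply le_antisymm
    · obtain ⟨p, hp, hpe⟩ := List.mem_iff_getElem.mp ((PySem.List.mem_sorted C (fun x : Int => x) false m).mpr (PySem.List.min?_mem hm))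
      rw [← hs] at hp
      have hmono := PySem.List.sorted_id_getElem_mono C (p := 0) (q := p) (by omega) (by rw [← hs]; omega)
      exact hpe ▸ hmono
    · exact PySem.List.min?_isMin hm _ ((PySem.List.mem_sorted C _ false _).mp (List.getElem_mem (by first | omega | (rw [← hs]; omega))))
  rw [hmemmax, hmemmin]
  simp

lemma pvQ_eq_of_ne (l r : List Int) (v : Int) (h : pvComb l r v ≠ []) :
    pvQ l r v = ((PySem.List.max? (pvComb l r v) (fun x => x)).getD 0
               - (PySem.List.min? (pvComb l r v) (fun x => x)).getD 0) ^ 2 := by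
  unfold pvQ
  rw [pvTele_sorted _ h]

lemma pvComb_ne_nil (l r : List Int) (v : Int) (h : v ∈ l ++ r) : pvComb l r v ≠ [] := by
  intro hnil
  rcases List.append_eq_nil_iff.mp hnil with ⟨h1, h2⟩
  rcases List.mem_append.mp h with hv | hv
  · exact (pvIdx_eq_nil_iff l v).mp h1 hv
  · exact (pvIdx_eq_nil_iff r v).mp h2 hv

lemma pvB_eq_sum (l r : List Int) :
    calculateSeparationScore_alt l r
      = ((PySem.List.dedup ((l ++ r).filter (fun x => 1 ≤ x))).map (pvQ l r)).sum := by
  unfold calculateSeparationScore_alt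
  simp only
  rw [PySem.List.foldl_add, zero_add]
  refine congrArg List.sum (List.map_congr_left ?_)
  intro v hv
  have hv' : v ∈ l ++ r := by
    have := (PySem.List.mem_dedup _ _).mp hv
    exact (List.mem_filter.mp this).1
  rw [pvQ_eq_of_ne l r v (pvComb_ne_nil l r v hv')]
  rfl

lemma pvQ_eq_zero (l r : List Int) (v : Int) (hl : v ∉ l) (hr : v ∉ r) : pvQ l r v = 0 := by
  unfold pvQ pvComb
  rw [(pvIdx_eq_nil_iff l v).mpr hl, (pvIdx_eq_nil_iff r v).mpr hr]
  rw [List.nil_append, show PySem.List.sorted ([] : List Int) (fun x => x) false = [] from rfl]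
  unfold pvTele
  rw [PySem.List.pyRange_one_eq_nil (by norm_num)]
  norm_num

lemma pv_sum_restrict (l r : List Int) (mx : Int)
    (h : PySem.List.max? (r ++ l) (fun x => x) = some mx) :
    ((PySem.List.pyRange 1 (mx + 1) 1).map (pvQ l r)).sum
      = ((PySem.List.dedup ((l ++ r).filter (fun x => 1 ≤ x))).map (pvQ l r)).sum := by
  rw [← List.sum_toFinset _ (PySem.List.nodup_pyRange_one 1 (mx + 1)),
      ← List.sum_toFinset _ (PySem.List.nodup_dedup ((l ++ r).filter (fun x => decide (1 ≤ x))))]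
  refine (Finset.sum_subset ?_ ?_).symm
  · intro v hv
    rw [List.mem_toFinset, PySem.List.mem_dedup, List.mem_filter] at hv
    obtain ⟨hvm, hv1⟩ := hv
    have hv1' : (1 : Int) ≤ v := by simpa using hv1
    have hvrl : v ∈ r ++ l := by
      rcases List.mem_append.mp hvm with h' | h'
      · exact List.mem_append.mpr (Or.inr h')
      · exact List.mem_append.mpr (Or.inl h')
    have hle : v ≤ mx := PySem.List.max?_isMax h v hvrl
    rw [List.mem_toFinset]
    exact PySem.List.mem_pyRange_one.mpr ⟨hv1', by omega⟩
  · intro v hvS hvD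
    have h1 : (1 : Int) ≤ v := (PySem.List.mem_pyRange_one.mp (List.mem_toFinset.mp hvS)).1
    have hvnot : v ∉ l ++ r := by
      intro hm
      exact hvD (List.mem_toFinset.mpr ((PySem.List.mem_dedup _ _).mpr
        (List.mem_filter.mpr ⟨hm, by simpa using h1⟩)))
    exact pvQ_eq_zero l r v (fun h' => hvnot (List.mem_append.mpr (Or.inl h')))
      (fun h' => hvnot (List.mem_append.mpr (Or.inr h')))

lemma pvA_eq_sum (l r : List Int) (mx : Int)
    (h : PySem.List.max? (r ++ l) (fun x => x) = some mx) :
    calculateSeparationScore l r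
      = ((PySem.List.pyRange 1 (mx + 1) 1).map (pvQ l r)).sum := by
  unfold calculateSeparationScore
  rw [h]
  simp only
  rw [PySem.List.foldl_append_singleton_eq_map
        (fun a => PySem.List.sorted
          (((PySem.List.enumerate l 0).filter (fun p => p.2 == a + 1)).map (fun p => p.1) ++
           ((PySem.List.enumerate r 0).filter (fun p => p.2 == a + 1)).map (fun p => p.1))
          (fun x => x) false),
      List.nil_append]
  rw [PySem.List.foldl_pyRange_zero_pyGetD' _ []
        (fun score row => score +
          ((PySem.List.pyRange 0 ((row.length : Int) - 1) 1).foldl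
            (fun av m => av + (PySem.List.pyGetD row (m + 1) 0 - PySem.List.pyGetD row m 0)) 0) ^ 2) 0]
  rw [PySem.List.foldl_add, zero_add, List.map_map]
  rw [PySem.List.pyRange_one 0 mx, PySem.List.pyRange_one 1 (mx + 1), List.map_map, List.map_map]
  simp only [sub_zero, add_sub_cancel_right]
  refine congrArg List.sum (List.map_congr_left ?_)
  intro k _
  simp only [Function.comp]
  have harg : (0 : Int) + (k : Int) + 1 = 1 + (k : Int) := by ring
  rw [harg]
  rfl

-- ===== VERDICT (by name: the statement is the Claim_ definition above) =====
theorem calculateSeparationScore_spec : Claim_equal_calculateSeparationScore := by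
  intro l r _ hpre
  unfold Spec_calculateSeparationScore
  have hne : r ++ l ≠ [] := by
    intro h; apply hpre
    rcases List.append_eq_nil_iff.mp h with ⟨h1, h2⟩
    simp [h1, h2]
  obtain ⟨mx, hmx⟩ : ∃ mx, PySem.List.max? (r ++ l) (fun x : Int => x) = some mx := by
    cases hmax : PySem.List.max? (r ++ l) (fun x : Int => x) with
    | none => exact absurd ((PySem.List.max?_eq_none_iff _ _).mp hmax) hne
    | some m => exact ⟨m, rfl⟩
  rw [pvA_eq_sum l r mx hmx, pv_sum_restrict l r mx hmx, pvB_eq_sum l r]
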